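-- pv_equiv track=rewrite | github.com/fengmoke/CEEN | models/DeepConvLSTM.py | GetFeatureMapSizeByConv
-- ===== SOURCE A (Python) =====
-- conv_list       =   {
--                     'ucihar':   [ (5,1), (1,1), (2,0) ],
--                     'uschad':   [ (5,1), (1,1), (2,0) ],
--                         }
--
-- def get_data_size(data_name, is_sup = False ):
--
--     Model_Seen_Sup_F_Size = {
--         'ucihar': (     1, 1, 128, 9     ) ,
--         'uschad': (     1, 1, 32,  6     ) ,
--     }
--     size_dict = Model_Seen_Sup_F_Size
--     if data_name in size_dict:
--         pass
--     else:
--         raise Exception( 'please input correct data name')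
--     return size_dict[data_name]
--
-- def GetFeatureMapSizeByConv(data_name,idex_layer):
--     size        = get_data_size(data_name)[2:]
--     conv_size   = conv_list[data_name]
--     h,w         = size
--     if idex_layer > 0:
--         for i in range(idex_layer):
--             # no pooling
--             h   =  h - conv_size[0][0] + 1
--             w   =  w - conv_size[0][1] + 1
--         return ( h , w )
--     else:
--         raise  ValueError(f'check your idex_layer')
-- ===== SOURCE B (Python) =====
-- # B: one consolidated per-dataset table ((h,w), (kh,kw)) and the closed form
-- # h - n*(kh-1), w - n*(kw-1), replacing A's two dict lookups + per-layer loop.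
-- _BASE = {
--     'ucihar': ((128, 9), (5, 1)),
--     'uschad': ((32, 6), (5, 1)),
-- }
--
-- def GetFeatureMapSizeByConv(data_name, idex_layer):
--     if data_name not in _BASE:
--         raise Exception('please input correct data name')
--     if idex_layer <= 0:
--         raise ValueError('check your idex_layer')
--     (h, w), (kh, kw) = _BASE[data_name]
--     return (h - idex_layer * (kh - 1), w - idex_layer * (kw - 1))
-- ===== Notes on version B (the rewrite author's own statement) =====
-- stated objective: simpler
-- what changed: Replaces the two staged dict lookups (size tuple slice + conv list) and the per-layer subtraction loop with one consolidated per-dataset table ((h,w),(kh,kw)) and the closed form (h - n*(kh-1), w - n*(kw-1)).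
import Mathlib
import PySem

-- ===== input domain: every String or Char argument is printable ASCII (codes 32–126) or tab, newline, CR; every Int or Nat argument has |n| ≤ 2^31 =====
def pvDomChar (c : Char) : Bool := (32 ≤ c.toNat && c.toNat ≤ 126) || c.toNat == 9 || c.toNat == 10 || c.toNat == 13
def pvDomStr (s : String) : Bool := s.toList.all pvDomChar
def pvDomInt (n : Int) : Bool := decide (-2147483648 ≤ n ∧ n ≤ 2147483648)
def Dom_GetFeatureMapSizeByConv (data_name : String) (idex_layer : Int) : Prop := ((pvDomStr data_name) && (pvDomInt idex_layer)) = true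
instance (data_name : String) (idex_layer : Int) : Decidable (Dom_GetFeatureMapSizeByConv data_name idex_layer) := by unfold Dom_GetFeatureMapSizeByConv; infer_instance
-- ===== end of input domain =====

-- B replaces A's staged lookups and per-layer loop with one table and a closed form.

-- ===== PORT A =====
-- module-level constant conv_list (dict, insertion order)
def convListA : List (String × List (Int × Int)) :=
  [("ucihar", [(5,1),(1,1),(2,0)]), ("uschad", [(5,1),(1,1),(2,0)])]

-- get_data_size: dict lookup; Python raises Exception on a missing key — that input is
-- outside Pre_, the port returns a junk default there.
def get_data_size (data_name : String) : Int × Int × Int × Int :=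
  match (PySem.Dict.ofList [("ucihar", ((1:Int),(1:Int),(128:Int),(9:Int))), ("uschad", (1,1,32,6))]).get? data_name with
  | some v => v
  | none => (0,0,0,0)

def GetFeatureMapSizeByConv (data_name : String) (idex_layer : Int) : Int × Int :=
  -- size = get_data_size(data_name)[2:]; h,w = size
  let size := get_data_size data_name
  let h := size.2.2.1
  let w := size.2.2.2
  let conv_size := match (PySem.Dict.ofList convListA).get? data_name with
    | some v => v
    | none => []      -- Python raises KeyError here; outside Pre_
  let c0 := PySem.List.pyGetD conv_size 0 (0,0)   -- conv_size[0] (nonempty inside Pre_)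
  if idex_layer > 0 then
    (PySem.List.pyRange 0 idex_layer 1).foldl
      (fun (p : Int × Int) _ => (p.1 - c0.1 + 1, p.2 - c0.2 + 1)) (h, w)
  else (0,0)   -- Python raises ValueError; outside Pre_

-- ===== PORT B =====
-- _BASE: one consolidated table ((h,w),(kh,kw)) per dataset
def baseB : PySem.Dict String ((Int × Int) × (Int × Int)) :=
  PySem.Dict.ofList [("ucihar", ((128, 9), (5, 1))), ("uschad", ((32, 6), (5, 1)))]

def GetFeatureMapSizeByConv_alt (data_name : String) (idex_layer : Int) : Int × Int :=
  match baseB.get? data_name with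
  | none => (0,0)                 -- Python raises Exception; outside Pre_
  | some ((h, w), (kh, kw)) =>
      if idex_layer ≤ 0 then (0,0)   -- Python raises ValueError; outside Pre_
      else (h - idex_layer * (kh - 1), w - idex_layer * (kw - 1))

-- ===== PRECONDITION & SPEC =====
-- Pre_ excludes exactly the raising inputs: unknown data_name (Exception) and idex_layer ≤ 0 (ValueError).
def Pre_GetFeatureMapSizeByConv (data_name : String) (idex_layer : Int) : Prop :=
  (data_name = "ucihar" ∨ data_name = "uschad") ∧ 0 < idex_layer
instance (data_name : String) (idex_layer : Int) : Decidable (Pre_GetFeatureMapSizeByConv data_name idex_layer) := by unfold Pre_GetFeatureMapSizeByConv; infer_instance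

def pvWitness_GetFeatureMapSizeByConv : String × Int := ("ucihar", 3)

def Spec_GetFeatureMapSizeByConv (data_name : String) (idex_layer : Int) (out : Int × Int) : Prop := out = GetFeatureMapSizeByConv_alt data_name idex_layer
instance (data_name : String) (idex_layer : Int) (out : Int × Int) : Decidable (Spec_GetFeatureMapSizeByConv data_name idex_layer out) := by unfold Spec_GetFeatureMapSizeByConv; infer_instance

-- ===== CLAIM (what is proved, stated in full; the proofs are below) =====
def Claim_equal_GetFeatureMapSizeByConv : Prop := ∀ (data_name : String) (idex_layer : Int), Dom_GetFeatureMapSizeByConv data_name idex_layer → Pre_GetFeatureMapSizeByConv data_name idex_layer → Spec_GetFeatureMapSizeByConv data_name idex_layer (GetFeatureMapSizeByConv data_name idex_layer)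

-- ===== LEMMAS AND PROOFS =====
-- A's loop subtracts (a-1, b-1) per element; closed form over any list.
theorem foldl_sub_const (a b : Int) : ∀ (l : List Int) (h w : Int),
    l.foldl (fun (p : Int × Int) _ => (p.1 - a + 1, p.2 - b + 1)) (h, w)
      = (h - (a - 1) * l.length, w - (b - 1) * l.length) := by
  intro l
  induction l with
  | nil => intro h w; simp
  | cons x xs ih =>
      intro h w
      simp only [List.foldl_cons, ih, List.length_cons, Prod.mk.injEq]
      constructor <;> (push_cast; ring)

theorem ports_agree (data_name : String) (idex_layer : Int)
    (hp : Pre_GetFeatureMapSizeByConv data_name idex_layer) :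
    GetFeatureMapSizeByConv data_name idex_layer = GetFeatureMapSizeByConv_alt data_name idex_layer := by
  obtain ⟨hname, hpos⟩ := hp
  have hlen : ((PySem.List.pyRange 0 idex_layer 1).length : Int) = idex_layer := by
    rw [PySem.List.length_pyRange_one]
    omega
  rcases hname with h | h <;> subst h <;>
    simp only [GetFeatureMapSizeByConv, GetFeatureMapSizeByConv_alt,
      if_pos hpos, if_neg (by omega : ¬ idex_layer ≤ 0), foldl_sub_const,
      (by decide : get_data_size "ucihar" = (1,1,128,9)),
      (by decide : get_data_size "uschad" = (1,1,32,6)),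
      (by decide : (PySem.Dict.ofList convListA).get? "ucihar" = some [(5,1),(1,1),(2,0)]),
      (by decide : (PySem.Dict.ofList convListA).get? "uschad" = some [(5,1),(1,1),(2,0)]),
      (by decide : baseB.get? "ucihar" = some ((128,9),(5,1))),
      (by decide : baseB.get? "uschad" = some ((32,6),(5,1))),
      (by decide : PySem.List.pyGetD [((5:Int),(1:Int)),(1,1),(2,0)] 0 (0,0) = (5,1)),
      hlen] <;>
    norm_num [hlen, mul_comm]

-- ===== VERDICT (by name: the statement is the Claim_ definition above) =====
theorem GetFeatureMapSizeByConv_spec : Claim_equal_GetFeatureMapSizeByConv := by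
  intro data_name idex_layer _ hp
  exact ports_agree data_name idex_layer hp
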